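-- pv_equiv track=rewrite | github.com/XxXaurora0821/Beat_the_odds | backend/game_engine.py | _seats_in_order_after
-- ===== SOURCE A (Python) =====
-- from typing import List, Optional
--
-- def _seats_in_order_after(all_seats: List[int], after_seat: int) -> List[int]:
--     """Return seats in circular order starting AFTER after_seat."""
--     s = sorted(all_seats)
--     idx = None
--     for i, seat in enumerate(s):
--         if seat > after_seat:
--             idx = i
--             break
--     if idx is None:
--         return s  # wrap: all seats are <= after_seat
--     return s[idx:] + s[:idx]
-- ===== SOURCE B (Python) =====
-- def _seats_in_order_after(all_seats, after_seat):
--     """Return seats in circular order starting AFTER after_seat."""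
--     greater = sorted(x for x in all_seats if x > after_seat)
--     rest = sorted(x for x in all_seats if x <= after_seat)
--     return greater + rest
-- ===== Notes on version B (the rewrite author's own statement) =====
-- stated objective: simpler
-- what changed: Replaces global sort + linear scan for the first seat > after_seat + slice rotation by two independent filtered sorts (seats greater than after_seat, then the rest) concatenated.
import Mathlib
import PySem

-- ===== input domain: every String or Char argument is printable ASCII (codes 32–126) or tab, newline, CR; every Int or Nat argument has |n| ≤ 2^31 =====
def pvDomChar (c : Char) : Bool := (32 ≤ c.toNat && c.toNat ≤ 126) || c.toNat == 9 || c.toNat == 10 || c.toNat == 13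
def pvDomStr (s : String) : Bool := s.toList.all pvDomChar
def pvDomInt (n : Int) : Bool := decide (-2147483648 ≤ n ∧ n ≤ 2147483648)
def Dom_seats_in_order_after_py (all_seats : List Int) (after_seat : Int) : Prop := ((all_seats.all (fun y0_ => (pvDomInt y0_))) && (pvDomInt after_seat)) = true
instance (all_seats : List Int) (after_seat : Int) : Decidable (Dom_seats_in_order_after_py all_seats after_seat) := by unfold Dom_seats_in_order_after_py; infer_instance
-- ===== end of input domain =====

-- B replaces A's global sort + linear scan for the split index + slice rotation by two
-- independently sorted filtered partitions (seats > after_seat, then seats ≤ after_seat), concatenated.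


-- ===== PORT A =====
-- the 'for i, seat in enumerate(s): if seat > after_seat: idx = i; break' loop
def pvFirstGtIdx (after_seat : Int) : List (Int × Int) → Option Int
  | [] => none
  | (i, seat) :: rest => if seat > after_seat then some i else pvFirstGtIdx after_seat rest

def seats_in_order_after_py (all_seats : List Int) (after_seat : Int) : List Int :=
  let s := PySem.List.sorted all_seats (fun x => x) false
  match pvFirstGtIdx after_seat (PySem.List.enumerate s) with
  | none => s
  | some idx => PySem.List.slice s (some idx) none ++ PySem.List.slice s none (some idx)

-- ===== PORT B =====
def seats_in_order_after_py_alt (all_seats : List Int) (after_seat : Int) : List Int :=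
  PySem.List.sorted (all_seats.filter (fun x => after_seat < x)) (fun x => x) false
    ++ PySem.List.sorted (all_seats.filter (fun x => x ≤ after_seat)) (fun x => x) false

-- ===== PRECONDITION & SPEC =====
def Spec_seats_in_order_after_py (all_seats : List Int) (after_seat : Int) (out : List Int) : Prop := out = seats_in_order_after_py_alt all_seats after_seat
instance (all_seats : List Int) (after_seat : Int) (out : List Int) : Decidable (Spec_seats_in_order_after_py all_seats after_seat out) := by unfold Spec_seats_in_order_after_py; infer_instance

-- ===== CLAIM (what is proved, stated in full; the proofs are below) =====
def Claim_equal_seats_in_order_after_py : Prop := ∀ (all_seats : List Int) (after_seat : Int), Dom_seats_in_order_after_py all_seats after_seat → Spec_seats_in_order_after_py all_seats after_seat (seats_in_order_after_py all_seats after_seat)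

-- ===== LEMMAS AND PROOFS =====

-- A's break-loop is findIdx? of the predicate, offset by the enumerate start.
theorem pvFirstGtIdx_enumerate (a : Int) (s : List Int) (k : Int) :
    pvFirstGtIdx a (PySem.List.enumerate s k)
      = (s.findIdx? (fun x => a < x)).map (fun (n : Nat) => k + (n : Int)) := by
  induction s generalizing k with
  | nil => simp [PySem.List.enumerate, pvFirstGtIdx]
  | cons x xs ih =>
    simp only [PySem.List.enumerate_cons, pvFirstGtIdx, List.findIdx?_cons]
    by_cases h : a < x
    · simp [h]
    · simp only [h, decide_eq_true_eq, if_false, ih (k + 1)]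
      cases xs.findIdx? (fun x => a < x) with
      | none => simp
      | some m => simp only [Option.map_some, Option.some.injEq]; push_cast; ring

-- sorted of a filtered list = filter of the sorted list (identity key).
theorem sorted_filter_eq (xs : List Int) (p : Int → Bool) :
    PySem.List.sorted (xs.filter p) (fun x => x) false
      = (PySem.List.sorted xs (fun x => x) false).filter p := by
  apply PySem.List.sorted_id_eq_of_perm_of_pairwise
  · exact (PySem.List.sorted_perm xs (fun x => x) false).filter p
  · exact List.Pairwise.filter p (PySem.List.sorted_pairwise xs (fun x => x))

-- On a (≤)-sorted list, the first-index-greater split is exactly the ≤/> partition.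
theorem split_at_findIdx (s : List Int) (a : Int) (n : Nat)
    (hp : s.Pairwise (· ≤ ·)) (h : s.findIdx? (fun x => a < x) = some n) :
    s.drop n = s.filter (fun x => a < x) ∧ s.take n = s.filter (fun x => x ≤ a) := by
  rw [List.findIdx?_eq_some_iff_getElem] at h
  obtain ⟨hn, hgt, hlt⟩ := h
  simp only [decide_eq_true_eq] at hgt
  have hpair := List.pairwise_iff_getElem.mp hp
  have htake : ∀ x ∈ s.take n, x ≤ a := by
    intro x hx
    rw [List.mem_take_iff_getElem] at hx
    obtain ⟨i, hi, hxi⟩ := hx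
    have hin : i < n := lt_of_lt_of_le hi (min_le_left _ _)
    have := hlt i hin
    simp only [decide_eq_true_eq, not_lt] at this
    omega
  have hdrop : ∀ x ∈ s.drop n, a < x := by
    intro x hx
    rw [List.mem_drop_iff_getElem] at hx
    obtain ⟨i, hi, hxi⟩ := hx
    have : s[n] ≤ s[n + i] := by
      rcases Nat.eq_zero_or_pos i with h0 | h0
      · subst h0; simp
      · exact hpair n (n + i) (by omega) (by omega) (by omega)
    omega
  constructor
  · conv_rhs => rw [← List.take_append_drop n s]
    rw [List.filter_append,
        List.filter_eq_nil_iff.mpr (by intro x hx; simpa using not_lt.mpr (htake x hx)),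
        List.filter_eq_self.mpr (by intro x hx; simpa using hdrop x hx), List.nil_append]
  · conv_rhs => rw [← List.take_append_drop n s]
    rw [List.filter_append,
        List.filter_eq_self.mpr (by intro x hx; simpa using htake x hx),
        List.filter_eq_nil_iff.mpr (by intro x hx; simpa using not_le.mpr (hdrop x hx)),
        List.append_nil]

-- ===== VERDICT (by name: the statement is the Claim_ definition above) =====
theorem seats_in_order_after_py_spec : Claim_equal_seats_in_order_after_py := by
  intro all_seats a _
  unfold Spec_seats_in_order_after_py
  simp only [seats_in_order_after_py, seats_in_order_after_py_alt]
  rw [sorted_filter_eq, sorted_filter_eq, pvFirstGtIdx_enumerate]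
  set s := PySem.List.sorted all_seats (fun x => x) false with hs
  have hpair : s.Pairwise (· ≤ ·) := PySem.List.sorted_pairwise all_seats (fun x => x)
  cases hfi : s.findIdx? (fun x => a < x) with
  | none =>
    rw [List.findIdx?_eq_none_iff] at hfi
    simp only [Option.map_none]
    rw [List.filter_eq_nil_iff.mpr (by intro x hx; simpa using hfi x hx),
        List.filter_eq_self.mpr (by
          intro x hx
          have h2 : ¬ a < x := by simpa using hfi x hx
          simpa using not_lt.mp h2),
        List.nil_append]
  | some n =>
    obtain ⟨hdrop, htake⟩ := split_at_findIdx s a n hpair hfi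
    simp only [Option.map_some, zero_add]
    rw [PySem.List.slice_from_natCast, PySem.List.slice_to_natCast, hdrop, htake]
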